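-- pv_equiv track=rewrite | github.com/google-research/google-research | qanet/util/tokenizer_util.py | partition_subtokens
-- ===== SOURCE A (Python) =====
-- def partition_subtokens(subtokens):
--   """Return list of (start, end , [list of subtokens]) for each token."""
--   words = []
--   last = 0
--   for i, token in enumerate(subtokens):
--     if token[-1] == '_':
--       words.append((last, i + 1, subtokens[last:i + 1]))
--       last = i + 1
--   return words
-- ===== SOURCE B (Python) =====
-- def partition_subtokens(subtokens):
--   """Return list of (start, end , [list of subtokens]) for each token."""
--   bounds = [0]
--   for i, token in enumerate(subtokens):
--     if token[-1] == '_':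
--       bounds.append(i + 1)
--   return [(a, b, subtokens[a:b]) for a, b in zip(bounds, bounds[1:])]
-- ===== Notes on version B (the rewrite author's own statement) =====
-- stated objective: alternative
-- what changed: B first collects all word-boundary indices in one pass, then builds the triples by zipping consecutive boundaries and slicing, instead of A's single loop that carries a 'last' cursor and appends triples as it goes.
import Mathlib
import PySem

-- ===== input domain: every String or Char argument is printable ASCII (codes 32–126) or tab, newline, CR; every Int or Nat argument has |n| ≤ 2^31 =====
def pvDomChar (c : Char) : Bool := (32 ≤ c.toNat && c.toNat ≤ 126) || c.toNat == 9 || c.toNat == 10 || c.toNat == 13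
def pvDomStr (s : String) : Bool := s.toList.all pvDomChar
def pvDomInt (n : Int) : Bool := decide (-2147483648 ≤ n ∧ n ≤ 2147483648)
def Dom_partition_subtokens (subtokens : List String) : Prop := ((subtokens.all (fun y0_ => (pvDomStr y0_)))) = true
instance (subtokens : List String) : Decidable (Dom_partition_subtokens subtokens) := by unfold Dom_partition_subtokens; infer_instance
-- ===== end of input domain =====

-- B collects the word-boundary indices in one pass and then builds the triples
-- by zipping consecutive boundaries; A carries a 'last' cursor and appends as it goes.

-- ===== PORT A =====
-- A's loop: state is (words, last); on a token ending in '_' append the triple and move the cursor.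
def partition_subtokens (subtokens : List String) : List (Int × Int × List String) :=
  ((PySem.List.enumerate subtokens 0).foldl
    (fun (st : List (Int × Int × List String) × Int) p =>
      if PySem.Str.pyGet? p.2 (-1) = some '_' then
        (st.1 ++ [(st.2, p.1 + 1, PySem.List.slice subtokens (some st.2) (some (p.1 + 1)))],
         p.1 + 1)
      else st)
    ([], 0)).1

-- ===== PORT B =====
def partition_subtokens_alt (subtokens : List String) : List (Int × Int × List String) :=
  let bounds : List Int :=
    (PySem.List.enumerate subtokens 0).foldl
      (fun acc p => if PySem.Str.pyGet? p.2 (-1) = some '_' then acc ++ [p.1 + 1] else acc)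
      [(0 : Int)]
  (bounds.zip bounds.tail).map
    (fun q => (q.1, q.2, PySem.List.slice subtokens (some q.1) (some q.2)))

-- ===== PRECONDITION & SPEC =====
-- Pre_ excludes lists containing an empty token, on which Python A (token[-1]) raises IndexError.
def Pre_partition_subtokens (subtokens : List String) : Prop := "" ∉ subtokens
instance (subtokens : List String) : Decidable (Pre_partition_subtokens subtokens) := by unfold Pre_partition_subtokens; infer_instance
def pvWitness_partition_subtokens : List String := ["an_", "ti", "de_", "dis"]
def Spec_partition_subtokens (subtokens : List String) (out : List (Int × Int × List String)) : Prop := out = partition_subtokens_alt subtokens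
instance (subtokens : List String) (out : List (Int × Int × List String)) : Decidable (Spec_partition_subtokens subtokens out) := by unfold Spec_partition_subtokens; infer_instance

-- ===== CLAIM (what is proved, stated in full; the proofs are below) =====
def Claim_equal_partition_subtokens : Prop := ∀ (subtokens : List String), Dom_partition_subtokens subtokens → Pre_partition_subtokens subtokens → Spec_partition_subtokens subtokens (partition_subtokens subtokens)

-- ===== LEMMAS AND PROOFS =====

-- the boundary indices contributed by a list of enumerated tokens
def pvCuts (ps : List (Int × String)) : List Int :=
  ps.filterMap (fun p => if PySem.Str.pyGet? p.2 (-1) = some '_' then some (p.1 + 1) else none)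

-- A's loop, started at cursor `last` with accumulated `words`, produces the triples
-- of consecutive elements of (last :: cuts ps).
theorem pvLoop_eq (subtokens : List String) :
    ∀ (ps : List (Int × String)) (words : List (Int × Int × List String)) (last : Int),
    (ps.foldl
      (fun (st : List (Int × Int × List String) × Int) p =>
        if PySem.Str.pyGet? p.2 (-1) = some '_' then
          (st.1 ++ [(st.2, p.1 + 1, PySem.List.slice subtokens (some st.2) (some (p.1 + 1)))],
           p.1 + 1)
        else st)
      (words, last)).1
    = words ++ ((last :: pvCuts ps).zip (pvCuts ps)).map
        (fun q => (q.1, q.2, PySem.List.slice subtokens (some q.1) (some q.2))) := by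
  intro ps
  induction ps with
  | nil => intro words last; simp [pvCuts]
  | cons p ps ih =>
    intro words last
    by_cases h : PySem.Str.pyGet? p.2 (-1) = some '_'
    · simp only [List.foldl_cons, h, if_pos, pvCuts, List.filterMap_cons]
      rw [ih]
      simp [pvCuts, List.zip_cons_cons]
    · simp only [List.foldl_cons, h, if_neg, pvCuts, List.filterMap_cons, not_false_iff]
      rw [ih]
      simp [pvCuts]

-- B's boundary loop is 0 followed by the cuts.
theorem pvBounds_eq (ps : List (Int × String)) (acc : List Int) :
    ps.foldl
      (fun acc p => if PySem.Str.pyGet? p.2 (-1) = some '_' then acc ++ [p.1 + 1] else acc)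
      acc = acc ++ pvCuts ps := by
  induction ps generalizing acc with
  | nil => simp [pvCuts]
  | cons p ps ih =>
    simp only [List.foldl_cons, pvCuts, List.filterMap_cons]
    split_ifs with h <;> rw [ih] <;> simp [pvCuts]

-- ===== VERDICT (by name: the statement is the Claim_ definition above) =====
theorem partition_subtokens_spec : Claim_equal_partition_subtokens := by
  intro subtokens _ _
  unfold Spec_partition_subtokens partition_subtokens partition_subtokens_alt
  rw [pvLoop_eq subtokens (PySem.List.enumerate subtokens 0) [] 0,
      pvBounds_eq (PySem.List.enumerate subtokens 0) [(0 : Int)]]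
  simp
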